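-- pv_equiv track=rewrite | github.com/Vilmo18/Agentic-Debt | data/processed_data/temporal_debt/snapshots/DetectPalindromes/post_review/palindrome_detector.py | _iter_sentences
-- ===== SOURCE A (Python) =====
-- from typing import List, Iterator, Tuple
--
-- def _iter_sentences(line: str) -> Iterator[Tuple[int, int]]:
--     """
--     Yield (start, end) spans of sentence-like segments within a single line.
--     Sentences end at '.', '!' or '?' (include trailing closing quotes/brackets if present).
--     The final fragment without terminal punctuation is also yielded.
--     """
--     n = len(line)
--     start = 0
--     i = 0
--     while i < n:
--         if line[i] in ".!?":
--             end = i + 1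
--             # Include typical trailing quotes/brackets adjacent to sentence end.
--             while end < n and line[end] in ')"\']':
--                 end += 1
--             yield start, end
--             # Skip whitespace before next sentence
--             j = end
--             while j < n and line[j].isspace():
--                 j += 1
--             start = j
--             i = j
--         else:
--             i += 1
--     if start < n:
--         yield start, n
-- ===== SOURCE B (Python) =====
-- def _iter_sentences(line):
--     """Two-pass rewrite: first collect every sentence-end position (terminator
--     plus its run of closing quotes/brackets), then pair them with running
--     starts, skipping whitespace between sentences."""
--     n = len(line)
--     # Pass 1: the end of every terminator run.
--     ends = []
--     i = 0
--     while i < n: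
--         if line[i] in ".!?":
--             i += 1
--             while i < n and line[i] in ')"\']':
--                 i += 1
--             ends.append(i)
--         else:
--             i += 1
--     # Pass 2: emit spans with a running start.
--     start = 0
--     for end in ends:
--         yield start, end
--         start = end
--         while start < n and line[start].isspace():
--             start += 1
--     if start < n:
--         yield start, n
-- ===== Notes on version B (the rewrite author's own statement) =====
-- stated objective: alternative
-- what changed: A's single interleaved index machine (one while loop mutating start/i and yielding inline) is replaced by two separate passes: pass 1 collects every sentence-end position (terminator plus its closing-quote/bracket run), pass 2 pairs those ends with running starts, skipping inter-sentence whitespace.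
import Mathlib
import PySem

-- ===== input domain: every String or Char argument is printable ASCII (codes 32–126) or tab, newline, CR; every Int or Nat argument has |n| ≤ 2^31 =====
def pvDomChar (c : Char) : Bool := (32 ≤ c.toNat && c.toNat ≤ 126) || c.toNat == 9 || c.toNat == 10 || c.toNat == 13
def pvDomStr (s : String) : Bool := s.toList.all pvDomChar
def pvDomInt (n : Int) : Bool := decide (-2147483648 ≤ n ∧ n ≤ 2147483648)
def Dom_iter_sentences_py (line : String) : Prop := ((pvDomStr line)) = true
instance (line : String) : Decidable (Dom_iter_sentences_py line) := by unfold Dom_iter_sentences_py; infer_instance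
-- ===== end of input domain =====

-- B replaces A's single interleaved index machine by two passes (collect all
-- sentence-end positions, then emit spans with a running start); alternative
-- decomposition, same cost, same return value everywhere.

-- ===== PORT A =====
def pvIsTerm (c : Char) : Bool := c == '.' || c == '!' || c == '?'
def pvIsClose (c : Char) : Bool := c == ')' || c == '"' || c == '\'' || c == ']'

-- A's inner 'while end < n and line[end] in ...)': extend past closing chars
def aExtend (cs : List Char) (e : Nat) : Nat :=
  if e < cs.length ∧ pvIsClose (cs.getD e ' ') then aExtend cs (e + 1) else e
termination_by cs.length - e
decreasing_by omega

-- A's inner 'while j < n and line[j].isspace()': skip whitespace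
def aSkip (cs : List Char) (j : Nat) : Nat :=
  if j < cs.length ∧ PySem.Chars.isspace (cs.getD j ' ') then aSkip cs (j + 1) else j
termination_by cs.length - j
decreasing_by omega

theorem aExtend_ge (cs : List Char) (e : Nat) : e ≤ aExtend cs e := by
  fun_induction aExtend cs e with
  | case1 e h ih => omega
  | case2 e h => omega

theorem aSkip_ge (cs : List Char) (j : Nat) : j ≤ aSkip cs j := by
  fun_induction aSkip cs j with
  | case1 j h ih => omega
  | case2 j h => omega

-- A's outer while loop (state: start, i); the trailing 'if start < n: yield'
-- is the loop's exit case
def aLoop (cs : List Char) (start i : Nat) : List (Int × Int) :=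
  if i < cs.length then
    if pvIsTerm (cs.getD i ' ') then
      let e := aExtend cs (i + 1)
      let j := aSkip cs e
      ((start : Int), (e : Int)) :: aLoop cs j j
    else aLoop cs start (i + 1)
  else if start < cs.length then [((start : Int), (cs.length : Int))] else []
termination_by cs.length - i
decreasing_by
  · have h1 := aExtend_ge cs (i + 1)
    have h2 := aSkip_ge cs (aExtend cs (i + 1))
    omega
  · omega

def iter_sentences_py (line : String) : List (Int × Int) :=
  aLoop line.toList 0 0

-- ===== PORT B =====
-- B pass 1: extend past closing chars after a terminator
def bRun (cs : List Char) (i : Nat) : Nat :=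
  if i < cs.length ∧ pvIsClose (cs.getD i ' ') then bRun cs (i + 1) else i
termination_by cs.length - i
decreasing_by omega

theorem bRun_ge (cs : List Char) (i : Nat) : i ≤ bRun cs i := by
  fun_induction bRun cs i with
  | case1 i h ih => omega
  | case2 i h => omega

-- B pass 1: list of all sentence-end positions
def bEnds (cs : List Char) (i : Nat) : List Nat :=
  if i < cs.length then
    if pvIsTerm (cs.getD i ' ') then
      let e := bRun cs (i + 1)
      e :: bEnds cs e
    else bEnds cs (i + 1)
  else []
termination_by cs.length - i
decreasing_by
  · have := bRun_ge cs (i + 1); omega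
  · omega

-- B pass 2: skip whitespace after an emitted span
def bSkip (cs : List Char) (j : Nat) : Nat :=
  if j < cs.length ∧ PySem.Chars.isspace (cs.getD j ' ') then bSkip cs (j + 1) else j
termination_by cs.length - j
decreasing_by omega

-- B pass 2: pair ends with running starts; final fragment at the end
def bEmit (cs : List Char) (start : Nat) (ends : List Nat) : List (Int × Int) :=
  match ends with
  | [] => if start < cs.length then [((start : Int), (cs.length : Int))] else []
  | e :: rest => ((start : Int), (e : Int)) :: bEmit cs (bSkip cs e) rest

def iter_sentences_py_alt (line : String) : List (Int × Int) :=
  bEmit line.toList 0 (bEnds line.toList 0)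

-- ===== PRECONDITION & SPEC =====
def Spec_iter_sentences_py (line : String) (out : List (Int × Int)) : Prop := out = iter_sentences_py_alt line
instance (line : String) (out : List (Int × Int)) : Decidable (Spec_iter_sentences_py line out) := by unfold Spec_iter_sentences_py; infer_instance

-- ===== CLAIM (what is proved, stated in full; the proofs are below) =====
def Claim_equal_iter_sentences_py : Prop := ∀ (line : String), Dom_iter_sentences_py line → Spec_iter_sentences_py line (iter_sentences_py line)

-- ===== LEMMAS AND PROOFS =====
theorem extend_eq_run (cs : List Char) (e : Nat) : aExtend cs e = bRun cs e := by
  fun_induction aExtend cs e with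
  | case1 e h ih => rw [bRun]; simp only [if_pos h]; exact ih
  | case2 e h => rw [bRun]; simp only [if_neg h]

theorem skip_eq_skip (cs : List Char) (j : Nat) : aSkip cs j = bSkip cs j := by
  fun_induction aSkip cs j with
  | case1 j h ih => rw [bSkip]; simp only [if_pos h]; exact ih
  | case2 j h => rw [bSkip]; simp only [if_neg h]

theorem term_not_space (c : Char) (h : pvIsTerm c = true) :
    PySem.Chars.isspace c = false := by
  simp only [pvIsTerm, Bool.or_eq_true, beq_iff_eq] at h
  rcases h with (h | h) | h <;> subst h <;> decide

-- the sentence-end positions are unchanged by skipping whitespace first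
theorem bEnds_bSkip (cs : List Char) (j : Nat) :
    bEnds cs (bSkip cs j) = bEnds cs j := by
  fun_induction bSkip cs j with
  | case1 j h ih =>
      have hterm : pvIsTerm (cs.getD j ' ') = false := by
        cases hc : pvIsTerm (cs.getD j ' ')
        · rfl
        · exact absurd h.2 (by rw [term_not_space _ hc]; simp)
      rw [ih]
      conv_rhs => rw [bEnds]
      rw [if_pos h.1, if_neg (by simpa using hterm)]
  | case2 j h => rfl

theorem aLoop_eq_bEmit (cs : List Char) (start i : Nat) :
    aLoop cs start i = bEmit cs start (bEnds cs i) := by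
  fun_induction aLoop cs start i with
  | case1 start i hlt hterm e j ih =>
      have he : e = bRun cs (i + 1) := extend_eq_run cs (i + 1)
      have hj : j = bSkip cs e := skip_eq_skip cs e
      have key : bEnds cs i = bRun cs (i + 1) :: bEnds cs (bRun cs (i + 1)) := by
        rw [bEnds]; simp only [if_pos hlt, if_pos hterm]
      rw [ih, key, ← he, bEmit, ← bEnds_bSkip cs e, ← hj]
  | case2 start i hlt hterm ih =>
      have key : bEnds cs i = bEnds cs (i + 1) := by
        rw [bEnds]; rw [if_pos hlt, if_neg (by simpa using hterm)]
      rw [key]; exact ih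
  | case3 start i hlt hstart =>
      rw [bEnds, if_neg hlt, bEmit, if_pos hstart]
  | case4 start i hlt hstart =>
      rw [bEnds, if_neg hlt, bEmit, if_neg hstart]

-- ===== VERDICT (by name: the statement is the Claim_ definition above) =====
theorem iter_sentences_py_spec : Claim_equal_iter_sentences_py := by
  intro line _
  unfold Spec_iter_sentences_py iter_sentences_py iter_sentences_py_alt
  exact aLoop_eq_bEmit line.toList 0 0
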